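-- pv_equiv track=rewrite | github.com/2675030956/binance-event-horizon | scripts/binance_event_horizon.py | tag_names_from_map
-- ===== SOURCE A (Python) =====
-- from typing import Any, Dict, Iterable, List, Optional
--
-- def dedupe_list(items: Iterable[Any]) -> List[Any]:
--     seen = set()
--     output: List[Any] = []
--     for item in items:
--         if item in seen:
--             continue
--         seen.add(item)
--         output.append(item)
--     return output
--
-- def tag_names_from_map(tag_map: Any) -> List[str]:
--     output: List[str] = []
--     if not isinstance(tag_map, dict):
--         return output
--     for group, items in tag_map.items():
--         if group:
--             output.append(str(group))
--         if isinstance(items, list):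
--             for item in items:
--                 if isinstance(item, dict) and item.get("tagName"):
--                     output.append(str(item.get("tagName")))
--     return dedupe_list(output)
-- ===== SOURCE B (Python) =====
-- def _uniq(xs):
--     # order-preserving dedupe by repeated filtering: take the head, drop all
--     # of its later copies, repeat on the remainder (no auxiliary seen-set)
--     out = []
--     while xs:
--         head = xs[0]
--         out.append(head)
--         xs = [x for x in xs[1:] if x != head]
--     return out
--
-- def tag_names_from_map(tag_map):
--     if not isinstance(tag_map, dict):
--         return []
--     names = [s
--              for group, items in tag_map.items()
--              for s in ([str(group)] if group else [])
--                  + [str(it.get("tagName"))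
--                     for it in (items if isinstance(items, list) else [])
--                     if isinstance(it, dict) and it.get("tagName")]]
--     return _uniq(names)
-- ===== Notes on version B (the rewrite author's own statement) =====
-- stated objective: alternative
-- what changed: Replaces A's seen-set dedupe loop with an order-preserving dedupe by repeated filtering (take the head, drop its later copies from the rest, repeat), and collects the candidate names with one flattening comprehension instead of nested append loops.
import Mathlib
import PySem

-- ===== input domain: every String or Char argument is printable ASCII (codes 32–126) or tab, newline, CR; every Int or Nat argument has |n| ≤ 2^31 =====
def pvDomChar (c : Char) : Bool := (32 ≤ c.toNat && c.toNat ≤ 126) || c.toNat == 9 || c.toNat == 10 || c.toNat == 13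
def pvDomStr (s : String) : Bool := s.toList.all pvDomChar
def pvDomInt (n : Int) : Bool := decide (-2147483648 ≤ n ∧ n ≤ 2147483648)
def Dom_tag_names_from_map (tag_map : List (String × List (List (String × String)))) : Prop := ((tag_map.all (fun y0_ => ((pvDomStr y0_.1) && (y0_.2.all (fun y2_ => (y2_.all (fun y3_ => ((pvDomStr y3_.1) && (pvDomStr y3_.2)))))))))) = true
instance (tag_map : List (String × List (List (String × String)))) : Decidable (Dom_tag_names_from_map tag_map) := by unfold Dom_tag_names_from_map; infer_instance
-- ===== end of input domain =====

-- B collects the names with one flattening comprehension and dedupes by repeated head-filtering instead of a seen-set loop (objective: alternative; B trades the auxiliary set for quadratic filtering).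


-- ===== PORT A =====
-- helper dedupe_list: loop with a seen set and an output accumulator
def dedupe_list (items : List String) : List String :=
  (items.foldl
    (fun st item =>
      if PySem.Set.contains st.1 item then st
      else (PySem.Set.add st.1 item, st.2 ++ [item]))
    ((PySem.Set.empty : PySem.Set String), ([] : List String))).2

-- A's inner loop body: append item.get("tagName") if truthy
def pvStepItem (output : List String) (item : List (String × String)) : List String :=
  match (PySem.Dict.mk item).get? "tagName" with
  | some s => if s ≠ "" then output ++ [s] else output
  | none => output

-- A's outer loop body: append the group if truthy, then run the inner loop
def pvStepGroup (output : List String) (gi : String × List (List (String × String))) : List String :=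
  let output := if gi.1 ≠ "" then output ++ [gi.1] else output
  gi.2.foldl pvStepItem output

-- under the stated type tag_map IS a dict and items ARE lists of dicts, so the
-- isinstance guards are identities; item.get("tagName") is first-match lookup
def tag_names_from_map (tag_map : List (String × List (List (String × String)))) : List String :=
  dedupe_list (tag_map.foldl pvStepGroup [])

-- ===== PORT B =====
-- the inner comprehension's per-item contribution: str(it.get("tagName")) if truthy
def pvTag? (item : List (String × String)) : Option String :=
  match (PySem.Dict.mk item).get? "tagName" with
  | some s => if s ≠ "" then some s else none
  | none => none

-- the flattening comprehension of Source B
def pvCollect (tag_map : List (String × List (List (String × String)))) : List String :=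
  tag_map.flatMap (fun gi =>
    (if gi.1 ≠ "" then [gi.1] else []) ++ gi.2.filterMap pvTag?)

-- _uniq: repeated head-filtering (Source B's while loop as recursion on the shrinking list)
def pvUniq : List String → List String
  | [] => []
  | h :: t => h :: pvUniq (t.filter (fun x => x ≠ h))
termination_by xs => xs.length
decreasing_by simp; exact le_trans (List.length_filter_le _ _) (by simp)

def tag_names_from_map_alt (tag_map : List (String × List (List (String × String)))) : List String :=
  pvUniq (pvCollect tag_map)

-- ===== PRECONDITION & SPEC =====
def Spec_tag_names_from_map (tag_map : List (String × List (List (String × String)))) (out : List String) : Prop := out = tag_names_from_map_alt tag_map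
instance (tag_map : List (String × List (List (String × String)))) (out : List String) : Decidable (Spec_tag_names_from_map tag_map out) := by unfold Spec_tag_names_from_map; infer_instance

-- ===== CLAIM =====
def Claim_equal_tag_names_from_map : Prop := ∀ (tag_map : List (String × List (List (String × String)))), Dom_tag_names_from_map tag_map → Spec_tag_names_from_map tag_map (tag_names_from_map tag_map)

-- ===== LEMMAS AND PROOFS =====

-- A's inner loop body appends exactly B's per-item contribution
theorem stepItem_eq (output : List String) (item : List (String × String)) :
    pvStepItem output item = output ++ (pvTag? item).toList := by
  unfold pvStepItem pvTag?
  cases (PySem.Dict.mk item).get? "tagName" with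
  | none => simp
  | some s => by_cases hs : s ≠ "" <;> simp [hs]

-- A's inner collection loop from any accumulator = accumulator ++ B's filterMap
theorem inner_collect (items : List (List (String × String))) (acc : List String) :
    items.foldl pvStepItem acc = acc ++ items.filterMap pvTag? := by
  induction items generalizing acc with
  | nil => simp
  | cons item rest ih =>
    rw [List.foldl_cons, stepItem_eq, ih, List.filterMap_cons]
    cases pvTag? item <;> simp

-- A's outer collection loop from any accumulator = accumulator ++ B's flatMap
theorem outer_collect (tag_map : List (String × List (List (String × String)))) (acc : List String) :
    tag_map.foldl pvStepGroup acc = acc ++ pvCollect tag_map := by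
  induction tag_map generalizing acc with
  | nil => simp [pvCollect]
  | cons gi rest ih =>
    rw [List.foldl_cons, ih]
    have hstep : pvStepGroup acc gi =
        acc ++ ((if gi.1 ≠ "" then [gi.1] else []) ++ gi.2.filterMap pvTag?) := by
      unfold pvStepGroup
      by_cases hg : gi.1 ≠ "" <;> simp [hg, inner_collect]
    rw [hstep]
    simp [pvCollect, List.append_assoc]

-- membership in (seen.add h), negated Bool form
theorem not_contains_add (seen : PySem.Set String) (h x : String) :
    (!(PySem.Set.contains (PySem.Set.add seen h) x)) =
      (decide (x ≠ h) && !(PySem.Set.contains seen x)) := by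
  by_cases h1 : x ∈ seen <;> by_cases h2 : x = h <;>
    simp [PySem.Set.mem_add, h1, h2]

-- A's seen-set dedupe loop, from any state, yields out ++ B's repeated
-- head-filter dedupe of the not-yet-seen elements
theorem dedupe_go (xs : List String) (seen : PySem.Set String) (out : List String) :
    (xs.foldl
      (fun st item =>
        if PySem.Set.contains st.1 item then st
        else (PySem.Set.add st.1 item, st.2 ++ [item]))
      (seen, out)).2 =
    out ++ pvUniq (xs.filter (fun x => !(PySem.Set.contains seen x))) := by
  induction xs generalizing seen out with
  | nil => simp [pvUniq]
  | cons h t ih =>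
    by_cases hc : h ∈ seen
    · have hcb : PySem.Set.contains seen h = true := by simpa using hc
      simp only [List.foldl_cons, List.filter_cons, hcb, if_true, Bool.not_true,
        Bool.false_eq_true, ite_false]
      exact ih seen out
    · have hcb : PySem.Set.contains seen h = false := by simpa using hc
      simp only [List.foldl_cons, List.filter_cons, hcb, Bool.false_eq_true, if_false,
        Bool.not_false, if_true]
      rw [ih]
      have hfil : t.filter (fun x => !(PySem.Set.contains (PySem.Set.add seen h) x)) =
          (t.filter (fun x => !(PySem.Set.contains seen x))).filter (fun x => decide (x ≠ h)) := by
        rw [List.filter_filter]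
        apply List.filter_congr
        intro x _
        rw [not_contains_add]
      rw [hfil, pvUniq, List.append_assoc, List.singleton_append]

-- dedupe_list = _uniq
theorem dedupe_eq_uniq (xs : List String) : dedupe_list xs = pvUniq xs := by
  unfold dedupe_list
  rw [dedupe_go]
  have : xs.filter (fun x => !(PySem.Set.contains (PySem.Set.empty : PySem.Set String) x)) = xs := by
    simp [PySem.Set.contains, PySem.Set.empty]
  rw [this, List.nil_append]

-- ===== VERDICT =====
theorem tag_names_from_map_spec : Claim_equal_tag_names_from_map := by
  intro tag_map _
  show tag_names_from_map tag_map = tag_names_from_map_alt tag_map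
  unfold tag_names_from_map tag_names_from_map_alt
  rw [outer_collect, dedupe_eq_uniq, List.nil_append]
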